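-- pv_equiv track=rewrite | github.com/gajeshbhat/binarySearch-Programming-Puzzles | text_editor.py | solve
-- ===== SOURCE A (Python) =====
-- def solve(s):
--     editor_stk = list()
--     for i in range(len(s)):
--         current_char = s[i]
--         if current_char == '-':
--             # Look at the previous charcter
--             if i > 0 and s[i-1] == '<':
--                 # Pop two times : Check len the second time as we might pop the very first character
--                 editor_stk.pop()
--                 if len(editor_stk) > 0:
--                     editor_stk.pop()
--             else:
--                 editor_stk.append(current_char)
--         else:
--             editor_stk.append(current_char)
--     rev_str = str()
--     for char in editor_stk:
--         rev_str = rev_str + char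
--     return rev_str
-- ===== SOURCE B (Python) =====
-- def solve(s):
--     # Right-to-left scan with a pending-backspace counter: no stack, no pops.
--     kept = []
--     skip = 0
--     j = len(s) - 1
--     while j >= 0:
--         if j >= 1 and s[j] == '-' and s[j - 1] == '<':
--             skip += 1
--             j -= 2
--         else:
--             if skip:
--                 skip -= 1
--             else:
--                 kept.append(s[j])
--             j -= 1
--     return ''.join(reversed(kept))
-- ===== Notes on version B (the rewrite author's own statement) =====
-- stated objective: alternative
-- what changed: B scans the string right-to-left with a pending-backspace counter that skips deleted characters (no stack is ever popped), then reverses the kept characters, instead of A's left-to-right stack simulation that pushes the bracket and pops twice.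
import Mathlib
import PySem

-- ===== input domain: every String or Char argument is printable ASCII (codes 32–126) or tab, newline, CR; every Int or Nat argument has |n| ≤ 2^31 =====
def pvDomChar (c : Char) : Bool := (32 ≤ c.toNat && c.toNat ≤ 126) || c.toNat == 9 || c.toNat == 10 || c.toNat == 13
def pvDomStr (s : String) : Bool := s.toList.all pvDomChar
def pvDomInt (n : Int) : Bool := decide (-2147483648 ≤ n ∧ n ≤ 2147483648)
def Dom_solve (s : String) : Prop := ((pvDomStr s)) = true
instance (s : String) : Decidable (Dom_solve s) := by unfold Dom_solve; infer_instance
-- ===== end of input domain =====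

-- B replaces A's left-to-right stack simulation (push the bracket, pop twice on '-') with a
-- right-to-left scan carrying a pending-backspace counter (nothing is ever popped), then a final
-- reverse; same O(n) cost, the objective is an alternative algorithm.

-- ===== PORT A =====
-- A's for-loop over range(len(s)); stack kept in order: append = ++ [c], pop = dropLast
-- (A's unguarded first pop is always applied to a stack whose last element is the '<' pushed
-- at i-1, hence never on an empty stack; dropLast is exact there).
def solveGo (l : List Char) (i : Nat) (stk : List Char) : List Char :=
  if h : i < l.length then
    solveGo l (i+1)
      (if l[i] = '-' then
        if 0 < i ∧ l[i-1]? = some '<' then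
          -- pop two times, checking length the second time
          if stk.dropLast.length > 0 then stk.dropLast.dropLast else stk.dropLast
        else stk ++ [l[i]]
      else stk ++ [l[i]])
  else stk
termination_by l.length - i

-- rev_str built by repeated string concatenation
def solve (s : String) : String :=
  (solveGo s.toList 0 []).foldl (fun r c => r.push c) ""

-- ===== PORT B =====
-- B's while-loop scanning right-to-left; Lean's j is Python's j+1 (the count of unscanned
-- characters), so Python's `j >= 1 and s[j] == '-' and s[j-1] == '<'` is the condition below.
-- The `none` arm is unreachable from solve_alt (j-1 is always in range); Python never indexes there.
def solveAltGo (l : List Char) (j : Nat) (skip : Nat) (kept : List Char) : List Char :=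
  if _h : 0 < j then
    if 2 ≤ j ∧ l[j-1]? = some '-' ∧ l[j-2]? = some '<' then
      solveAltGo l (j-2) (skip+1) kept
    else if skip > 0 then
      solveAltGo l (j-1) (skip-1) kept
    else
      match l[j-1]? with
      | some c => solveAltGo l (j-1) skip (kept ++ [c])
      | none => kept
  else kept
termination_by j

-- ''.join(reversed(kept))
def solve_alt (s : String) : String :=
  String.ofList (solveAltGo s.toList s.toList.length 0 []).reverse

-- ===== PRECONDITION & SPEC =====
def Spec_solve (s : String) (out : String) : Prop := out = solve_alt s
instance (s : String) (out : String) : Decidable (Spec_solve s out) := by unfold Spec_solve; infer_instance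

-- ===== CLAIM (what is proved, stated in full; the proofs are below) =====
def Claim_equal_solve : Prop := ∀ (s : String), Dom_solve s → Spec_solve s (solve s)

-- ===== LEMMAS AND PROOFS =====

-- Reference form of the edited text: a single left-to-right pass in which the two-character token
-- '<','-' deletes the top of the accumulated output. Both ports are reduced to it.
def tokRun (out : List Char) : List Char → List Char
  | [] => out
  | c :: rest =>
    if c = '<' ∧ rest.head? = some '-' then tokRun out.dropLast rest.tail
    else tokRun (out ++ [c]) rest
termination_by l => l.length
decreasing_by all_goals (simp [List.length_tail]; try omega)

-- A's loop from position i equals the reference pass over the remaining suffix, provided i is not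
-- the '-' of a backspace token (A peeks one character back).
lemma go_eq (l : List Char) (i : Nat) (stk : List Char)
    (hfresh : ¬ (0 < i ∧ l[i-1]? = some '<' ∧ l[i]? = some '-')) :
    solveGo l i stk = tokRun stk (l.drop i) := by
  by_cases h : i < l.length
  · have hd : l.drop i = l[i] :: l.drop (i+1) := List.drop_eq_getElem_cons h
    by_cases hm : l[i] = '<' ∧ (l.drop (i+1)).head? = some '-'
    · -- a backspace token starts at i
      obtain ⟨hi, hnext⟩ := hm
      rw [List.head?_drop] at hnext
      have h1lt : i + 1 < l.length := by
        by_contra hc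
        rw [List.getElem?_eq_none (by omega)] at hnext; cases hnext
      have hgetA : l[i+1] = '-' := by
        rw [List.getElem?_eq_getElem h1lt] at hnext; exact Option.some.inj hnext
      have hprev : l[i+1-1]? = some '<' := by
        show l[i]? = some '<'
        rw [List.getElem?_eq_getElem h, hi]
      -- A: push '<' at i, then at i+1 pop it back and pop once more (guarded)
      rw [solveGo, dif_pos h]
      simp only [hi, if_neg (by decide : ¬ ('<' = '-'))]
      rw [solveGo, dif_pos h1lt, if_pos hgetA,
        if_pos (show 0 < i + 1 ∧ l[i+1-1]? = some '<' from ⟨by omega, hprev⟩),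
        List.dropLast_concat]
      have hstk : (if stk.length > 0 then stk.dropLast else stk) = stk.dropLast := by
        cases stk <;> simp
      rw [hstk]
      -- reference: the token deletes the top
      rw [hd, tokRun, if_pos ⟨hi, by rw [List.head?_drop]; exact hnext⟩, List.tail_drop]
      exact go_eq l (i + 2) stk.dropLast (by
        rintro ⟨_, hc, _⟩
        have h2 : l[i+2-1]? = some '-' := by
          show l[i+1]? = some '-'
          rw [List.getElem?_eq_getElem h1lt, hgetA]
        rw [h2] at hc
        exact absurd (Option.some.inj hc) (by decide))
    · -- ordinary character at i: both push it
      rw [solveGo, dif_pos h]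
      have hpush :
          (if l[i] = '-' then
            if 0 < i ∧ l[i-1]? = some '<' then
              if stk.dropLast.length > 0 then stk.dropLast.dropLast else stk.dropLast
            else stk ++ [l[i]]
          else stk ++ [l[i]]) = stk ++ [l[i]] := by
        by_cases hc : l[i] = '-'
        · rw [if_pos hc, if_neg]
          rintro ⟨hgt, hlt⟩
          exact hfresh ⟨hgt, hlt, by rw [List.getElem?_eq_getElem h, hc]⟩
        · rw [if_neg hc]
      rw [hpush, hd, tokRun, if_neg hm]
      exact go_eq l (i + 1) (stk ++ [l[i]]) (by
        rintro ⟨_, hc1, hc2⟩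
        simp only [Nat.add_sub_cancel] at hc1
        have hlt : l[i] = '<' := by
          rw [List.getElem?_eq_getElem h] at hc1; exact Option.some.inj hc1
        exact hm ⟨hlt, by rw [List.head?_drop]; exact hc2⟩)
  · rw [solveGo, dif_neg h, List.drop_eq_nil_of_le (by omega), tokRun]
termination_by l.length - i
decreasing_by all_goals omega

-- appending a backspace token deletes the last kept character
lemma tokRun_append_pair (out xs : List Char) :
    tokRun out (xs ++ ['<', '-']) = (tokRun out xs).dropLast := by
  induction out, xs using tokRun.induct with
  | case1 out => simp [tokRun]
  | case2 out c rest hcond ih =>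
    obtain ⟨hc, hh⟩ := hcond
    obtain ⟨r, rest', rfl⟩ : ∃ r rest', rest = r :: rest' := by
      cases rest with
      | nil => cases hh
      | cons r rest' => exact ⟨r, rest', rfl⟩
    rw [List.cons_append, tokRun, if_pos ⟨hc, by simpa using hh⟩]
    simpa using ih.trans (by rw [tokRun, if_pos ⟨hc, hh⟩])
  | case3 out c rest hcond ih =>
    have hcond' : ¬ (c = '<' ∧ (rest ++ ['<', '-']).head? = some '-') := by
      cases rest with
      | nil => rintro ⟨_, hh⟩; simp at hh
      | cons r rest' => simpa using hcond
    rw [List.cons_append, tokRun, if_neg hcond']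
    rw [ih, tokRun, if_neg hcond]

-- appending an ordinary character (one that does not close a token) just keeps it
lemma tokRun_append_single (out xs : List Char) (c : Char)
    (hc : c = '-' → xs.getLast? ≠ some '<') :
    tokRun out (xs ++ [c]) = tokRun out xs ++ [c] := by
  induction out, xs using tokRun.induct with
  | case1 out =>
    simp [tokRun]
  | case2 out x rest hcond ih =>
    obtain ⟨hx, hh⟩ := hcond
    obtain ⟨r, rest', rfl⟩ : ∃ r rest', rest = r :: rest' := by
      cases rest with
      | nil => cases hh
      | cons r rest' => exact ⟨r, rest', rfl⟩
    have hr : r = '-' := by simpa using hh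
    rw [List.cons_append, tokRun, if_pos ⟨hx, by simpa using hh⟩]
    have ih' := ih (by
      intro h1 h2
      cases rest' with
      | nil => simp at h2
      | cons y ys =>
        exact hc h1 (by rw [List.getLast?_cons_cons, List.getLast?_cons_cons]; simpa using h2))
    simpa using ih'.trans (by rw [tokRun, if_pos ⟨hx, hh⟩])
  | case3 out x rest hcond ih =>
    have hcond' : ¬ (x = '<' ∧ (rest ++ [c]).head? = some '-') := by
      cases rest with
      | nil =>
        rintro ⟨hx, hh⟩
        have : c = '-' := by simpa using hh
        exact hc this (by simp [hx])
      | cons r rest' => simpa using hcond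
    rw [List.cons_append, tokRun, if_neg hcond']
    have ih' := ih (by
      intro h1 h2
      cases rest with
      | nil => simp at h2
      | cons y ys => exact hc h1 (by rw [List.getLast?_cons_cons]; exact h2))
    rw [ih', tokRun, if_neg hcond]

-- B's reverse scan from boundary j with `skip` pending backspaces yields the reference result on
-- the prefix, with `skip` characters truncated from its top, reversed onto `kept`; the boundary
-- must not split a backspace token.
lemma rev_eq (l : List Char) (j skip : Nat) (kept : List Char)
    (hj : j ≤ l.length)
    (hcross : ¬ (0 < j ∧ l[j-1]? = some '<' ∧ l[j]? = some '-')) :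
    solveAltGo l j skip kept
      = kept ++ ((tokRun [] (l.take j)).take ((tokRun [] (l.take j)).length - skip)).reverse := by
  by_cases h : 0 < j
  · have hj1 : j - 1 < l.length := by omega
    by_cases htok : 2 ≤ j ∧ l[j-1]? = some '-' ∧ l[j-2]? = some '<'
    · obtain ⟨h2, hminus, hlt⟩ := htok
      have hj2 : j - 2 < l.length := by omega
      have htake : l.take j = l.take (j-2) ++ ['<', '-'] := by
        have e1 : j = (j-1) + 1 := by omega
        have e2 : j - 1 = (j-2) + 1 := by omega
        rw [e1, List.take_add_one, ← e1, e2, List.take_add_one, ← e2, hminus, hlt]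
        simp
      have hstep : tokRun [] (l.take j) = (tokRun [] (l.take (j-2))).dropLast := by
        rw [htake, tokRun_append_pair]
      rw [solveAltGo, dif_pos h, if_pos ⟨h2, hminus, hlt⟩]
      rw [rev_eq l (j-2) (skip+1) kept (by omega) (by
        rintro ⟨_, hc, hc2⟩
        have : j - 2 - 1 + 1 = j - 2 := by omega
        rw [show j - 2 = j - 2 from rfl] at hc2
        rw [hlt] at hc2
        exact absurd (Option.some.inj hc2) (by decide))]
      congr 2
      rw [hstep, List.dropLast_eq_take, List.take_take]
      congr 1
      simp only [List.length_take]
      omega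
    · -- ordinary character at the boundary
      have hc : l[j-1]? = some l[j-1] := List.getElem?_eq_getElem hj1
      have htake : l.take j = l.take (j-1) ++ [l[j-1]] := by
        conv_lhs => rw [show j = (j-1) + 1 by omega]
        rw [List.take_add_one, hc]
        simp
      have hsingle : tokRun [] (l.take j) = tokRun [] (l.take (j-1)) ++ [l[j-1]] := by
        refine (htake ▸ tokRun_append_single [] (l.take (j-1)) (l[j-1]) ?_)
        intro hdash hlast
        -- if the new character is '-' the one before it is not '<', else htok would hold
        rcases Nat.lt_or_ge j 2 with h1 | h2
        · have : j = 1 := by omega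
          subst this; simp at hlast
        · have hj2 : j - 2 < l.length := by omega
          have ht2 : l.take (j-1) = l.take (j-2) ++ (l[j-2]?).toList := by
            conv_lhs => rw [show j - 1 = (j-2) + 1 by omega]
            rw [List.take_add_one]
          rw [ht2, List.getElem?_eq_getElem hj2] at hlast
          simp only [Option.toList_some] at hlast
          rw [List.getLast?_concat] at hlast
          exact htok ⟨h2, by rw [hc, hdash], by rw [List.getElem?_eq_getElem hj2]; exact hlast⟩
      have hcross' : ¬ (0 < j - 1 ∧ l[j-1-1]? = some '<' ∧ l[j-1]? = some '-') := by
        rintro ⟨hp, hp1, hp2⟩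
        exact htok ⟨by omega, hp2, by simpa using hp1⟩
      rw [solveAltGo, dif_pos h, if_neg htok]
      by_cases hs : skip > 0
      · rw [if_pos hs, rev_eq l (j-1) (skip-1) kept (by omega) hcross']
        congr 2
        rw [hsingle, List.take_append_of_le_length (by simp; omega)]
        congr 1
        simp; omega
      · have hs0 : skip = 0 := by omega
        subst hs0
        rw [if_neg hs, hc]
        show solveAltGo l (j-1) 0 (kept ++ [l[j-1]]) = _
        rw [rev_eq l (j-1) 0 (kept ++ [l[j-1]]) (by omega) hcross']
        rw [hsingle]
        simp [List.take_of_length_le]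
  · have hj0 : j = 0 := by omega
    subst hj0
    rw [solveAltGo, dif_neg (by omega)]
    simp [tokRun]
termination_by j
decreasing_by all_goals omega

lemma foldl_push (l : List Char) (acc : String) :
    (l.foldl (fun r c => r.push c) acc).toList = acc.toList ++ l := by
  induction l generalizing acc with
  | nil => simp
  | cons c cs ih => simp [ih, String.toList_push]

-- ===== VERDICT (by name: the statement is the Claim_ definition above) =====
theorem solve_spec : Claim_equal_solve := by
  intro s _
  unfold Spec_solve solve solve_alt
  apply String.toList_inj.mp
  rw [go_eq s.toList 0 [] (by rintro ⟨h, _⟩; omega)]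
  rw [rev_eq s.toList s.toList.length 0 [] (le_refl _) (by
    rintro ⟨_, _, hc⟩
    rw [List.getElem?_eq_none (le_refl _)] at hc
    cases hc)]
  simp [foldl_push]
  rw [List.take_of_length_le (by simp)]
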